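-- pv_equiv track=rewrite | github.com/LotusEcho/AdventOfCode2018 | src/day5/day5_part2.py | react
-- ===== SOURCE A (Python) =====
-- def react(reaction_subset, reaction_string):
--     original_string_len = len(reaction_string)
--     new_string = reaction_string
--     for character in reaction_subset:
--         new_string = new_string.replace(f"{character}{character.upper()}", "")
--         new_string = new_string.replace(f"{character.upper()}{character}", "")
--
--     if len(new_string) == 0 or len(new_string) == original_string_len:
--         return new_string
--     else:
--         return react(reaction_subset, new_string)
-- ===== SOURCE B (Python) =====
-- def react(reaction_subset, reaction_string):
--     reactive = set()
--     for c in reaction_subset: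
--         reactive.add((c, c.upper()))
--         reactive.add((c.upper(), c))
--     stack = []
--     for ch in reaction_string:
--         if stack and (stack[-1], ch) in reactive:
--             stack.pop()
--         else:
--             stack.append(ch)
--     return "".join(stack)
-- ===== Notes on version B (the rewrite author's own statement) =====
-- stated objective: faster
-- what changed: B replaces A's repeated whole-string .replace passes iterated to a length fixpoint by a single left-to-right stack pass (pop when the top and the current character form a reactive pair, looked up in a precomputed set); Pre_ excludes subsets containing some letter in both cases, where the pair-removal rewrite is non-confluent and A's replace-pass order picks one of several defensible fixpoints.
-- outside the precondition, e.g. on react('aA', 'AAa'): A returns 'A', B returns 'a'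
import Mathlib
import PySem

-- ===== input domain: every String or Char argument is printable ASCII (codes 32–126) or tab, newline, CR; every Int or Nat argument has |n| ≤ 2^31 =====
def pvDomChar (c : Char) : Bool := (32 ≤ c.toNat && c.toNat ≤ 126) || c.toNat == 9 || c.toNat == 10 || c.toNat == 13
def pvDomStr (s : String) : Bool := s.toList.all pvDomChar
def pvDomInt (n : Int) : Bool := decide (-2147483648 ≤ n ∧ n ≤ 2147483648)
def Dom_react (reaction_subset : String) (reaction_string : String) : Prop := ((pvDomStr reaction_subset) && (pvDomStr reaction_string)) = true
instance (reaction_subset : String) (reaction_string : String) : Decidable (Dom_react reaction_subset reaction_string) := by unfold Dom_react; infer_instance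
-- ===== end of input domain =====

-- B replaces A's repeated full-string replace passes (to a length fixpoint) by one
-- left-to-right stack pass over the string with a precomputed set of reactive pairs.

-- ===== PORT A =====
-- Characterisation of Python's str.replace with a 2-character pattern and empty
-- replacement (needed by the port's termination proof, hence stated above it).
def pvRep (a b : Char) : List Char → List Char
  | [] => []
  | [x] => [x]
  | x :: y :: t => if x = a ∧ y = b then pvRep a b t else x :: pvRep a b (y :: t)

-- two-at-a-time induction principle used by several lemmas about pvRep
theorem pvTwoStep {P : List Char → Prop} (h0 : P []) (h1 : ∀ x, P [x])
    (h2 : ∀ x y t, P t → P (y :: t) → P (x :: y :: t)) : ∀ l, P l := by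
  have key : ∀ n l, l.length ≤ n → P l := by
    intro n
    induction n with
    | zero => intro l h; cases l with
      | nil => exact h0
      | cons x t => simp at h
    | succ m ih =>
      intro l h
      cases l with
      | nil => exact h0
      | cons x t =>
        cases t with
        | nil => exact h1 x
        | cons y t2 =>
          have hl : t2.length ≤ m := by simp at h; omega
          have hl2 : (y :: t2).length ≤ m := by simp at h ⊢; omega
          exact h2 x y t2 (ih t2 hl) (ih (y :: t2) hl2)
  exact fun l => key l.length l le_rfl

theorem pvRep_len (a b : Char) : ∀ l : List Char, (pvRep a b l).length ≤ l.length := by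
  apply pvTwoStep
  · simp [pvRep]
  · intro x; simp [pvRep]
  · intro x y t ht hyt
    simp only [pvRep]
    split_ifs with h
    · simp; omega
    · simp at hyt ⊢; omega

theorem pvGo (a b : Char) : ∀ (fuel : Nat) (l acc : List Char), l.length ≤ fuel →
    PySem.Chars.replace.go [a, b] [] fuel l acc = acc.reverse ++ pvRep a b l := by
  intro fuel
  induction fuel with
  | zero =>
    intro l acc h
    have : l = [] := by cases l <;> simp_all
    subst this
    simp [PySem.Chars.replace.go, pvRep]
  | succ f ih =>
    intro l acc h
    cases l with
    | nil => simp [PySem.Chars.replace.go, pvRep]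
    | cons c t =>
      cases t with
      | nil =>
        have hpre : ([a, b].isPrefixOf [c]) = false := by
          simp [List.isPrefixOf]
        simp only [PySem.Chars.replace.go, hpre]
        rw [ih [] (c :: acc) (by simp)]
        simp [pvRep]
      | cons y t2 =>
        have hlen : (y :: t2).length ≤ f := by simp at h ⊢; omega
        have hlen2 : t2.length ≤ f := by simp at h ⊢; omega
        by_cases hcy : c = a ∧ y = b
        · obtain ⟨hc, hy⟩ := hcy
          subst hc; subst hy
          have hpre : ([c, y].isPrefixOf (c :: y :: t2)) = true := by
            simp [List.isPrefixOf]
          simp only [PySem.Chars.replace.go, hpre, if_true]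
          rw [show (List.drop ([c,y].length) (c :: y :: t2)) = t2 by simp]
          rw [ih t2 _ hlen2]
          simp [pvRep]
        · have hpre : ([a, b].isPrefixOf (c :: y :: t2)) = false := by
            simp [List.isPrefixOf]
            intro hc hy
            exact absurd ⟨hc.symm, hy.symm⟩ hcy
          simp only [PySem.Chars.replace.go, hpre]
          rw [ih (y :: t2) (c :: acc) hlen]
          simp [pvRep, hcy]

theorem pvReplace_pair (a b : Char) (l : List Char) :
    PySem.Chars.replace l [a, b] [] = pvRep a b l := by
  simp only [PySem.Chars.replace]
  rw [if_neg (by simp)]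
  simpa using pvGo a b l.length l [] le_rfl

theorem pvReplace_len (a b : Char) (l : List Char) :
    (PySem.Chars.replace l [a, b] []).length ≤ l.length := by
  rw [pvReplace_pair]; exact pvRep_len a b l

-- the body of A's for-loop over reaction_subset (Python: the two .replace calls per character)
def reactPass (reaction_subset : String) (s : String) : String :=
  reaction_subset.toList.foldl (fun new_string character =>
    PySem.Str.replace
      (PySem.Str.replace new_string (String.ofList [character, PySem.Chars.upperChar character]) "")
      (String.ofList [PySem.Chars.upperChar character, character]) "") s

theorem reactPass_len (reaction_subset s : String) :
    (reactPass reaction_subset s).toList.length ≤ s.toList.length := by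
  unfold reactPass
  generalize reaction_subset.toList = S
  induction S generalizing s with
  | nil => simp
  | cons c cs ih =>
    simp only [List.foldl_cons]
    refine le_trans (ih _) ?_
    simp only [PySem.Str.toList_replace]
    refine le_trans ?_ (by simpa using pvReplace_len c (PySem.Chars.upperChar c) s.toList)
    simpa using pvReplace_len (PySem.Chars.upperChar c) c
      (PySem.Chars.replace s.toList [c, PySem.Chars.upperChar c] [])

-- Python's new_string is written out in place of a local binding.
def react (reaction_subset : String) (reaction_string : String) : String :=
  if PySem.Str.len (reactPass reaction_subset reaction_string) = 0 ∨
      PySem.Str.len (reactPass reaction_subset reaction_string) = PySem.Str.len reaction_string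
  then reactPass reaction_subset reaction_string
  else react reaction_subset (reactPass reaction_subset reaction_string)
termination_by reaction_string.toList.length
decreasing_by
  have hle := reactPass_len reaction_subset reaction_string
  simp only [PySem.Str.len] at *
  omega

-- ===== PORT B =====
-- Python's list-as-stack appends at the tail; the Lean stack keeps the top of the
-- stack at the HEAD of the list, hence the final reverse before joining.
def react_alt (reaction_subset : String) (reaction_string : String) : String :=
  let reactive : PySem.Set (Char × Char) := reaction_subset.toList.foldl
    (fun s c => PySem.Set.add (PySem.Set.add s (c, PySem.Chars.upperChar c))
      (PySem.Chars.upperChar c, c)) PySem.Set.empty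
  let stack := reaction_string.toList.foldl
    (fun stack ch =>
      match stack with
      | t :: rest => if PySem.Set.contains reactive (t, ch) then rest else ch :: t :: rest
      | [] => [ch]) []
  String.ofList stack.reverse

-- ===== PRECONDITION & SPEC =====
-- Pre_ excludes subsets containing some letter in BOTH cases (e.g. 'a' and 'A'): there
-- the pair-removal rewrite system is non-confluent ('aA', 'Aa' and 'AA' are all
-- reactive), several fixpoints exist, and A's replace-pass order picks one of them
-- accidentally while B's stack order may pick another; both are defensible.
def Pre_react (reaction_subset : String) (reaction_string : String) : Prop :=
  (reaction_subset.toList.all (fun c => !(PySem.Chars.islower c) ||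
    !(reaction_subset.toList.contains (PySem.Chars.upperChar c)))) = true
instance (reaction_subset : String) (reaction_string : String) :
    Decidable (Pre_react reaction_subset reaction_string) := by unfold Pre_react; infer_instance

def pvWitness_react : String × String := ("a", "abBA")

def Spec_react (reaction_subset : String) (reaction_string : String) (out : String) : Prop :=
  out = react_alt reaction_subset reaction_string
instance (reaction_subset : String) (reaction_string : String) (out : String) :
    Decidable (Spec_react reaction_subset reaction_string out) := by unfold Spec_react; infer_instance

-- ===== CLAIM (what is proved, stated in full; the proofs are below) =====
def Claim_equal_react : Prop := ∀ (reaction_subset : String) (reaction_string : String), Dom_react reaction_subset reaction_string → Pre_react reaction_subset reaction_string → Spec_react reaction_subset reaction_string (react reaction_subset reaction_string)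

-- ===== LEMMAS AND PROOFS =====

-- the reactive-pair relation induced by the subset (x immediately followed by y reacts)
def pvRb (S : List Char) (x y : Char) : Bool :=
  S.any (fun c => (x == c && y == PySem.Chars.upperChar c) ||
                  (x == PySem.Chars.upperChar c && y == c))

def pvStep (S : List Char) (σ : List Char) (c : Char) : List Char :=
  match σ with
  | [] => [c]
  | t :: r => if pvRb S t c then r else c :: t :: r

def pvRun (S l σ : List Char) : List Char := l.foldl (pvStep S) σ

-- "no two adjacent characters of the list satisfy R"
def pvNoAdj (R : Char → Char → Bool) : List Char → Prop
  | [] => True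
  | [_] => True
  | x :: y :: t => R x y = false ∧ pvNoAdj R (y :: t)

theorem pvNoAdj_tail {R : Char → Char → Bool} {x : Char} {l : List Char}
    (h : pvNoAdj R (x :: l)) : pvNoAdj R l := by
  cases l with
  | nil => trivial
  | cons y t => exact h.2

-- the stack never contains an adjacent reactive pair (top of stack first)
def pvIrred (S σ : List Char) : Prop := pvNoAdj (fun a b => pvRb S b a) σ

-- the string contains no adjacent reactive pair
def pvNoR (S l : List Char) : Prop := pvNoAdj (pvRb S) l

-- every character has at most one reaction partner
def pvUniq (S : List Char) : Prop :=
  ∀ a x y, pvRb S a x = true → pvRb S x y = true → a = y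

theorem pvRb_iff (S : List Char) (x y : Char) :
    pvRb S x y = true ↔ ∃ c ∈ S, (x = c ∧ y = PySem.Chars.upperChar c) ∨
      (x = PySem.Chars.upperChar c ∧ y = c) := by
  simp [pvRb]

-- ---- character-level facts about upperChar ----
theorem pvUp_not_lower {c : Char} (h : PySem.Chars.islower c = false) :
    PySem.Chars.upperChar c = c := by
  simp [PySem.Chars.upperChar, h]

theorem pvLower_toNat {c : Char} (h : PySem.Chars.islower c = true) :
    97 ≤ c.toNat ∧ c.toNat ≤ 122 := by
  simp [PySem.Chars.islower] at h
  obtain ⟨h1, h2⟩ := h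
  constructor
  · simpa [Char.le_def, UInt32.le_iff_toNat_le] using h1
  · simpa [Char.le_def, UInt32.le_iff_toNat_le] using h2

theorem pvUp_toNat {c : Char} (h : PySem.Chars.islower c = true) :
    (PySem.Chars.upperChar c).toNat = c.toNat - 32 := by
  have hb := pvLower_toNat h
  have hv : (c.toNat - 32).isValidChar := by
    left; omega
  simp [PySem.Chars.upperChar, h, Char.ofNat, hv]

theorem pvChar_toNat_inj {c d : Char} (h : c.toNat = d.toNat) : c = d := by
  have := congrArg Char.ofNat h
  rwa [Char.ofNat_toNat, Char.ofNat_toNat] at this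

theorem pvUp_cases {c d : Char}
    (h : PySem.Chars.upperChar c = PySem.Chars.upperChar d) :
    c = d ∨ (PySem.Chars.islower c = true ∧ d = PySem.Chars.upperChar c) ∨
      (PySem.Chars.islower d = true ∧ c = PySem.Chars.upperChar d) := by
  by_cases lc : PySem.Chars.islower c = true
  · by_cases ld : PySem.Chars.islower d = true
    · left
      apply pvChar_toNat_inj
      have hc := pvUp_toNat lc
      have hd := pvUp_toNat ld
      have hbc := pvLower_toNat lc
      have hbd := pvLower_toNat ld
      rw [h] at hc
      omega
    · right; left
      refine ⟨lc, ?_⟩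
      rw [h, pvUp_not_lower (by simpa using ld)]
  · by_cases ld : PySem.Chars.islower d = true
    · right; right
      refine ⟨ld, ?_⟩
      rw [← h, pvUp_not_lower (by simpa using lc)]
    · left
      rw [pvUp_not_lower (by simpa using lc), pvUp_not_lower (by simpa using ld)] at h
      exact h

-- Pre_react gives the unique-partner property of the reaction relation
theorem pvUniq_of_pre {S : List Char}
    (hp : ∀ c ∈ S, PySem.Chars.islower c = true → PySem.Chars.upperChar c ∉ S) :
    pvUniq S := by
  intro a x y h1 h2
  rw [pvRb_iff] at h1 h2
  obtain ⟨c, hc, hc'⟩ := h1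
  obtain ⟨d, hd, hd'⟩ := h2
  rcases hc' with ⟨ha, hx⟩ | ⟨ha, hx⟩ <;> rcases hd' with ⟨hx', hy⟩ | ⟨hx', hy⟩
  · -- a = c, x = up c ; x = d, y = up d
    have hdc : d = PySem.Chars.upperChar c := hx'.symm.trans hx
    by_cases lc : PySem.Chars.islower c = true
    · exact absurd (show PySem.Chars.upperChar c ∈ S by rw [← hdc]; exact hd) (hp c hc lc)
    · have hlc' : PySem.Chars.islower c = false := by simpa using lc
      rw [ha, hy, hdc, pvUp_not_lower (c := c) hlc', pvUp_not_lower (c := c) hlc']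
  · -- a = c, x = up c ; x = up d, y = d
    have hupc : PySem.Chars.upperChar c = PySem.Chars.upperChar d := hx.symm.trans hx'
    rcases pvUp_cases hupc with hcd | ⟨lc, hcd⟩ | ⟨ld, hdc⟩
    · rw [ha, hy, hcd]
    · exact absurd (show PySem.Chars.upperChar c ∈ S by rw [← hcd]; exact hd) (hp c hc lc)
    · exact absurd (show PySem.Chars.upperChar d ∈ S by rw [← hdc]; exact hc) (hp d hd ld)
  · -- a = up c, x = c ; x = d, y = up d
    have hcd : c = d := hx.symm.trans hx'
    rw [ha, hy, hcd]
  · -- a = up c, x = c ; x = up d, y = d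
    have hcd : c = PySem.Chars.upperChar d := hx.symm.trans hx'
    by_cases ld : PySem.Chars.islower d = true
    · exact absurd (show PySem.Chars.upperChar d ∈ S by rw [← hcd]; exact hc) (hp d hd ld)
    · have hld' : PySem.Chars.islower d = false := by simpa using ld
      rw [ha, hy, hcd, pvUp_not_lower (c := d) hld', pvUp_not_lower (c := d) hld']

theorem pvRb_base {S : List Char} {c : Char} (hc : c ∈ S) :
    pvRb S c (PySem.Chars.upperChar c) = true ∧
    pvRb S (PySem.Chars.upperChar c) c = true := by
  constructor <;> rw [pvRb_iff] <;> exact ⟨c, hc, by simp⟩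

-- ---- stack lemmas ----
theorem pvIrred_step {S σ : List Char} (h : pvIrred S σ) (c : Char) :
    pvIrred S (pvStep S σ c) := by
  cases σ with
  | nil => simp [pvStep, pvIrred, pvNoAdj]
  | cons t r =>
    simp only [pvStep]
    split_ifs with hr
    · exact pvNoAdj_tail h
    · exact ⟨by simpa using hr, h⟩

theorem pvIrred_run {S : List Char} : ∀ (l σ : List Char), pvIrred S σ →
    pvIrred S (pvRun S l σ) := by
  intro l
  induction l with
  | nil => intro σ h; exact h
  | cons c t ih => intro σ h; exact ih _ (pvIrred_step h c)

theorem pvStep_step {S : List Char} (hu : pvUniq S) {x y : Char}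
    (hxy : pvRb S x y = true) {σ : List Char} (hir : pvIrred S σ) :
    pvStep S (pvStep S σ x) y = σ := by
  cases σ with
  | nil => simp [pvStep, hxy]
  | cons t r =>
    simp only [pvStep]
    split_ifs with htx
    · -- popped: t reacts with x, so t = y by uniqueness
      have hty : t = y := hu t x y htx hxy
      cases r with
      | nil => simp [hty]
      | cons u r2 =>
        have hut : pvRb S u t = false := hir.1
        show (if pvRb S u y = true then r2 else y :: u :: r2) = t :: u :: r2
        rw [if_neg (by rw [← hty]; simp [hut]), hty]
    · simp [hxy]

theorem pvRun_del {S : List Char} (hu : pvUniq S) {x y : Char}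
    (hxy : pvRb S x y = true) (u v : List Char) :
    pvRun S (u ++ x :: y :: v) [] = pvRun S (u ++ v) [] := by
  have h1 : pvRun S (u ++ x :: y :: v) [] =
      pvRun S v (pvStep S (pvStep S (pvRun S u []) x) y) := by
    simp [pvRun, List.foldl_append]
  have h2 : pvRun S (u ++ v) [] = pvRun S v (pvRun S u []) := by
    simp [pvRun, List.foldl_append]
  rw [h1, h2, pvStep_step hu hxy (pvIrred_run u [] trivial)]

-- one deletion of an adjacent reactive pair, anywhere in the string
def pvStepR (S : List Char) (s t : List Char) : Prop :=
  ∃ u x y v, pvRb S x y = true ∧ s = u ++ x :: y :: v ∧ t = u ++ v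

theorem pvStepR_run {S : List Char} (hu : pvUniq S) {s t : List Char}
    (h : pvStepR S s t) : pvRun S s [] = pvRun S t [] := by
  obtain ⟨u, x, y, v, hxy, hs, ht⟩ := h
  subst hs; subst ht
  exact pvRun_del hu hxy u v

theorem pvStepR_cons {S : List Char} {s t : List Char} (c : Char)
    (h : pvStepR S s t) : pvStepR S (c :: s) (c :: t) := by
  obtain ⟨u, x, y, v, hxy, hs, ht⟩ := h
  exact ⟨c :: u, x, y, v, hxy, by simp [hs], by simp [ht]⟩

theorem pvMulti_run {S : List Char} (hu : pvUniq S) {s t : List Char}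
    (h : Relation.ReflTransGen (pvStepR S) s t) : pvRun S s [] = pvRun S t [] := by
  induction h with
  | refl => rfl
  | tail _ hst ih => rw [ih, pvStepR_run hu hst]

theorem pvRep_multi {S : List Char} {a b : Char} (hab : pvRb S a b = true) :
    ∀ l, Relation.ReflTransGen (pvStepR S) l (pvRep a b l) := by
  apply pvTwoStep
  · exact Relation.ReflTransGen.refl
  · intro x; exact Relation.ReflTransGen.refl
  · intro x y t ht hyt
    simp only [pvRep]
    split_ifs with h
    · obtain ⟨hx, hy⟩ := h
      subst hx; subst hy
      exact Relation.ReflTransGen.head ⟨[], x, y, t, hab, rfl, rfl⟩ ht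
    · exact Relation.ReflTransGen.lift (f := (x :: ·)) (fun _ _ => pvStepR_cons x) hyt

theorem pvRun_rep {S : List Char} (hu : pvUniq S) {a b : Char}
    (hab : pvRb S a b = true) (l : List Char) :
    pvRun S (pvRep a b l) [] = pvRun S l [] := by
  exact (pvMulti_run hu (pvRep_multi hab l)).symm

-- a reaction-free string passes through the stack unchanged
theorem pvRun_noreact {S : List Char} : ∀ (l σ : List Char), pvNoR S l →
    (∀ t r c t', σ = t :: r → l = c :: t' → pvRb S t c = false) →
    pvRun S l σ = l.reverse ++ σ := by
  intro l
  induction l with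
  | nil => intro σ _ _; simp [pvRun]
  | cons c t' ih =>
    intro σ hch hσ
    have hstep : pvStep S σ c = c :: σ := by
      cases σ with
      | nil => simp [pvStep]
      | cons t r => simp [pvStep, hσ t r c t' rfl rfl]
    have hrw : pvRun S (c :: t') σ = pvRun S t' (c :: σ) := by
      simp [pvRun, List.foldl_cons, hstep]
    rw [hrw, ih (c :: σ) (pvNoAdj_tail hch) ?_]
    · simp
    · intro t r c2 t2 hcs hl
      cases hcs
      cases hl
      exact hch.1

theorem pvNoR_run {S l : List Char} (h : pvNoR S l) : pvRun S l [] = l.reverse := by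
  rw [pvRun_noreact l [] h (by intro t r c t' habs; simp at habs)]
  simp

-- ---- pvRep fixpoint facts ----
theorem pvRep_eq_of_len {a b : Char} : ∀ {l : List Char},
    (pvRep a b l).length = l.length → pvRep a b l = l := by
  intro l
  induction l with
  | nil => intro _; rfl
  | cons x t ih =>
    intro h
    cases t with
    | nil => rfl
    | cons y t2 =>
      by_cases hxy : x = a ∧ y = b
      · exfalso
        rw [show pvRep a b (x :: y :: t2) = pvRep a b t2 by simp [pvRep, hxy]] at h
        have := pvRep_len a b t2
        simp at h
        omega
      · rw [show pvRep a b (x :: y :: t2) = x :: pvRep a b (y :: t2) by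
          simp [pvRep, hxy]] at h ⊢
        have ht : (pvRep a b (y :: t2)).length = (y :: t2).length := by
          simp at h ⊢; omega
        rw [ih ht]

theorem pvRep_fix_head {a b x y : Char} {t : List Char}
    (h : pvRep a b (x :: y :: t) = x :: y :: t) : ¬(x = a ∧ y = b) := by
  intro hxy
  rw [show pvRep a b (x :: y :: t) = pvRep a b t by simp [pvRep, hxy]] at h
  have hlen := congrArg List.length h
  have hle := pvRep_len a b t
  simp at hlen
  omega

theorem pvRep_fix_tail {a b x : Char} {r : List Char}
    (h : pvRep a b (x :: r) = x :: r) : pvRep a b r = r := by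
  cases r with
  | nil => rfl
  | cons y t =>
    by_cases hxy : x = a ∧ y = b
    · exact absurd hxy (pvRep_fix_head h)
    · rw [show pvRep a b (x :: y :: t) = x :: pvRep a b (y :: t) by
        simp [pvRep, hxy]] at h
      injection h

-- ---- the A-side pass at list level ----
def pvPass (S l : List Char) : List Char :=
  S.foldl (fun l c => pvRep (PySem.Chars.upperChar c) c (pvRep c (PySem.Chars.upperChar c) l)) l

theorem pvPass_toList (reaction_subset s : String) :
    (reactPass reaction_subset s).toList = pvPass reaction_subset.toList s.toList := by
  unfold reactPass pvPass
  generalize reaction_subset.toList = S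
  induction S generalizing s with
  | nil => simp
  | cons c cs ih =>
    simp only [List.foldl_cons]
    rw [ih]
    have harg : (PySem.Str.replace
        (PySem.Str.replace s (String.ofList [c, PySem.Chars.upperChar c]) "")
        (String.ofList [PySem.Chars.upperChar c, c]) "").toList =
        pvRep (PySem.Chars.upperChar c) c (pvRep c (PySem.Chars.upperChar c) s.toList) := by
      simp [PySem.Str.toList_replace, pvReplace_pair]
    rw [harg]

theorem pvPass_len (S : List Char) : ∀ l, (pvPass S l).length ≤ l.length := by
  induction S with
  | nil => intro l; simp [pvPass]
  | cons c cs ih =>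
    intro l
    simp only [pvPass, List.foldl_cons]
    refine le_trans (ih _) ?_
    refine le_trans (pvRep_len _ _ _) (pvRep_len _ _ _)

theorem pvPass_fix (S : List Char) : ∀ l, (pvPass S l).length = l.length →
    pvPass S l = l ∧ ∀ c ∈ S, pvRep c (PySem.Chars.upperChar c) l = l ∧
      pvRep (PySem.Chars.upperChar c) c l = l := by
  induction S with
  | nil => intro l _; exact ⟨rfl, by simp⟩
  | cons c cs ih =>
    intro l h
    have hstep : pvPass (c :: cs) l =
        pvPass cs (pvRep (PySem.Chars.upperChar c) c (pvRep c (PySem.Chars.upperChar c) l)) := by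
      simp [pvPass]
    rw [hstep] at h
    have h1 := pvRep_len c (PySem.Chars.upperChar c) l
    have h2 := pvRep_len (PySem.Chars.upperChar c) c (pvRep c (PySem.Chars.upperChar c) l)
    have h3 := pvPass_len cs (pvRep (PySem.Chars.upperChar c) c (pvRep c (PySem.Chars.upperChar c) l))
    have e1 : pvRep c (PySem.Chars.upperChar c) l = l := pvRep_eq_of_len (by omega)
    rw [e1] at h h2 h3
    have e2 : pvRep (PySem.Chars.upperChar c) c l = l := pvRep_eq_of_len (by omega)
    rw [e2] at h
    obtain ⟨hp, hall⟩ := ih l h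
    constructor
    · rw [hstep, e1, e2, hp]
    · intro d hd
      rcases List.mem_cons.mp hd with rfl | hd
      · exact ⟨e1, e2⟩
      · exact hall d hd

theorem pvFix_noR {S : List Char} : ∀ {l : List Char},
    (∀ c ∈ S, pvRep c (PySem.Chars.upperChar c) l = l ∧
      pvRep (PySem.Chars.upperChar c) c l = l) → pvNoR S l := by
  intro l
  induction l with
  | nil => intro _; trivial
  | cons x t ih =>
    intro h
    cases t with
    | nil => trivial
    | cons y t2 =>
      constructor
      · by_contra hxy
        have hxy' : pvRb S x y = true := by
          cases hb : pvRb S x y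
          · exact absurd hb hxy
          · rfl
        rw [pvRb_iff] at hxy'
        obtain ⟨c, hc, hcase⟩ := hxy'
        rcases hcase with ⟨hx, hy⟩ | ⟨hx, hy⟩
        · exact pvRep_fix_head (h c hc).1 ⟨hx, hy⟩
        · exact pvRep_fix_head (h c hc).2 ⟨hx, hy⟩
      · exact ih (fun c hc => ⟨pvRep_fix_tail (h c hc).1, pvRep_fix_tail (h c hc).2⟩)

theorem pvPass_run {S : List Char} (hu : pvUniq S) :
    ∀ (T : List Char), (∀ c ∈ T, c ∈ S) → ∀ l,
      pvRun S (T.foldl (fun l c => pvRep (PySem.Chars.upperChar c) c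
        (pvRep c (PySem.Chars.upperChar c) l)) l) [] = pvRun S l [] := by
  intro T
  induction T with
  | nil => intro _ l; rfl
  | cons c cs ih =>
    intro hsub l
    simp only [List.foldl_cons]
    rw [ih (fun d hd => hsub d (List.mem_cons_of_mem c hd))]
    have hc := hsub c (List.mem_cons_self ..)
    obtain ⟨hb1, hb2⟩ := pvRb_base (S := S) hc
    rw [pvRun_rep hu hb2, pvRun_rep hu hb1]

-- ---- A computes the stack result ----
theorem pvToList_inj {s t : String} (h : s.toList = t.toList) : s = t := by
  have hs : String.ofList s.toList = s := by simp
  have ht : String.ofList t.toList = t := by simp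
  rw [← hs, ← ht, h]

theorem pvReact_run {reaction_subset : String} (hu : pvUniq reaction_subset.toList) :
    ∀ n, ∀ s : String, s.toList.length ≤ n →
      react reaction_subset s =
        String.ofList ((pvRun reaction_subset.toList s.toList []).reverse) := by
  intro n
  induction n using Nat.strong_induction_on with
  | _ n ih =>
    intro s hsn
    rw [react.eq_def]
    simp only [PySem.Str.len]
    have hpassL := pvPass_toList reaction_subset s
    have hrun : pvRun reaction_subset.toList (reactPass reaction_subset s).toList [] =
        pvRun reaction_subset.toList s.toList [] := by
      rw [hpassL]
      exact pvPass_run hu reaction_subset.toList (fun _ h => h) s.toList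
    split_ifs with h
    · rcases h with h | h
      · -- empty result
        have hnil : (reactPass reaction_subset s).toList = [] := by
          have h0 : (reactPass reaction_subset s).toList.length = 0 := by exact_mod_cast h
          exact List.length_eq_zero_iff.mp h0
        apply pvToList_inj
        rw [hnil]
        have hz : pvRun reaction_subset.toList s.toList [] = [] := by
          rw [← hrun, hnil]; rfl
        simp [hz]
      · -- length unchanged: already a fixpoint of the pass
        have hlen : (pvPass reaction_subset.toList s.toList).length = s.toList.length := by
          rw [← hpassL]; exact_mod_cast h
        obtain ⟨hfixp, hall⟩ := pvPass_fix reaction_subset.toList s.toList hlen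
        have hnoR : pvNoR reaction_subset.toList s.toList := pvFix_noR hall
        apply pvToList_inj
        rw [hpassL, hfixp]
        rw [pvNoR_run hnoR]
        simp
    · rw [not_or] at h
      obtain ⟨h0, hne⟩ := h
      have hlt : (reactPass reaction_subset s).toList.length < s.toList.length := by
        have hle := reactPass_len reaction_subset s
        have hne' : (reactPass reaction_subset s).toList.length ≠ s.toList.length := by
          intro habs
          exact hne (by exact_mod_cast habs)
        omega
      rw [ih (reactPass reaction_subset s).toList.length (by omega)
        (reactPass reaction_subset s) le_rfl]
      rw [hrun]

-- ---- B computes the stack result ----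
theorem pvBool_eq {a b : Bool} (h : a = true ↔ b = true) : a = b := by
  cases a <;> cases b <;> simp_all

theorem pvBuild_mem (S : List Char) :
    ∀ (acc : PySem.Set (Char × Char)) (p : Char × Char),
      p ∈ S.foldl (fun s c => PySem.Set.add (PySem.Set.add s (c, PySem.Chars.upperChar c))
        (PySem.Chars.upperChar c, c)) acc ↔
      p ∈ acc ∨ ∃ c ∈ S, p = (c, PySem.Chars.upperChar c) ∨ p = (PySem.Chars.upperChar c, c) := by
  induction S with
  | nil => intro acc p; simp
  | cons c cs ih =>
    intro acc p
    simp only [List.foldl_cons]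
    rw [ih]
    simp only [PySem.Set.mem_add, List.mem_cons, exists_eq_or_imp]
    simp only [or_assoc]

theorem pvContains_rb (reaction_subset : String) (t ch : Char) :
    PySem.Set.contains (reaction_subset.toList.foldl
      (fun s c => PySem.Set.add (PySem.Set.add s (c, PySem.Chars.upperChar c))
        (PySem.Chars.upperChar c, c)) PySem.Set.empty) (t, ch) =
    pvRb reaction_subset.toList t ch := by
  apply pvBool_eq
  rw [PySem.Set.contains, List.contains_iff_mem,
    pvBuild_mem reaction_subset.toList PySem.Set.empty (t, ch), pvRb_iff]
  constructor
  · rintro (habs | ⟨c, hc, hcase⟩)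
    · exact absurd habs (by simp [PySem.Set.empty])
    · refine ⟨c, hc, ?_⟩
      rcases hcase with h | h <;> [left; right] <;> simpa [Prod.ext_iff] using h
  · rintro ⟨c, hc, hcase⟩
    right
    refine ⟨c, hc, ?_⟩
    rcases hcase with ⟨h1, h2⟩ | ⟨h1, h2⟩ <;> [left; right] <;> simp [h1, h2]

theorem pvFoldl_congr {α β : Type} {f g : α → β → α} (h : ∀ σ c, f σ c = g σ c) :
    ∀ (l : List β) (σ : α), l.foldl f σ = l.foldl g σ := by
  intro l
  induction l with
  | nil => intro σ; rfl
  | cons c t ih => intro σ; simp only [List.foldl_cons, h, ih]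

theorem pvAlt_run (reaction_subset s : String) :
    react_alt reaction_subset s =
      String.ofList ((pvRun reaction_subset.toList s.toList []).reverse) := by
  simp only [react_alt]
  refine congrArg String.ofList (congrArg List.reverse ?_)
  unfold pvRun
  apply pvFoldl_congr
  intro σ ch
  cases σ with
  | nil => rfl
  | cons t r =>
    simp only [pvStep]
    rw [pvContains_rb reaction_subset t ch]

-- ===== VERDICT (by name: the statement is the Claim_ definition above) =====
theorem react_spec : Claim_equal_react := by
  intro reaction_subset reaction_string _ hpre
  unfold Spec_react
  have hp : ∀ c ∈ reaction_subset.toList, PySem.Chars.islower c = true →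
      PySem.Chars.upperChar c ∉ reaction_subset.toList := by
    intro c hc hlow
    have h2 := List.all_eq_true.mp hpre c hc
    simp only [hlow, Bool.not_true, Bool.false_or] at h2
    simpa [List.contains_iff_mem] using h2
  have hu : pvUniq reaction_subset.toList := pvUniq_of_pre hp
  rw [pvReact_run hu reaction_string.toList.length reaction_string le_rfl,
    pvAlt_run reaction_subset reaction_string]
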